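-- pv_equiv track=rewrite | github.com/BattleForged/codejam | 2018_3/b.py | feature_is_same
-- ===== SOURCE A (Python) =====
-- NEIBER_COUNT = 4
--
-- def feature_is_same(f1, f2):
--     used = [False] * NEIBER_COUNT
--     for i in range(NEIBER_COUNT):
--         for j in range(NEIBER_COUNT):
--             if not used[j] and f1[i] == f2[j]:
--                 used[j] = True
--                 break
--         else:
--             return False
--     return True
-- ===== SOURCE B (Python) =====
-- NEIBER_COUNT = 4
--
-- def feature_is_same(f1, f2):
--     a = [f1[i] for i in range(NEIBER_COUNT)]
--     b = [f2[i] for i in range(NEIBER_COUNT)]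
--     return sorted(a) == sorted(b)
-- ===== Notes on version B (the rewrite author's own statement) =====
-- stated objective: simpler
-- what changed: Replaces the nested scan with a used[] marker array by materializing the first four elements of each list and comparing their sorted copies for multiset equality.
-- outside the precondition, e.g. on feature_is_same([5], [1, 2, 3, 4]): A returns False, B raises IndexError; on feature_is_same([1, 2], [1, 9, 9, 9]): A returns False, B raises IndexError
import Mathlib
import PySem

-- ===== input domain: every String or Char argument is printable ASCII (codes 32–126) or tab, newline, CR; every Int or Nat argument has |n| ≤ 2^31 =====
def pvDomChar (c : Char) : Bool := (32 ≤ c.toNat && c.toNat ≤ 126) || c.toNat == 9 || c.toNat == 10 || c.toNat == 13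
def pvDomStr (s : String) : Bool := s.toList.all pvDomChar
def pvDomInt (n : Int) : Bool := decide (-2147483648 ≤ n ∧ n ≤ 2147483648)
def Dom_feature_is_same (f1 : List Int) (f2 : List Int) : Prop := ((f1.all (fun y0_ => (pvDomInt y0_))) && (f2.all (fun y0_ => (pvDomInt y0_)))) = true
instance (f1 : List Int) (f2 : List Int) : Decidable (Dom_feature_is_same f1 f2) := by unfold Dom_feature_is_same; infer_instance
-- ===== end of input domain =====

-- B replaces A's nested scan with a used[] marker array by a sort-and-compare of the
-- four-element prefixes (multiset equality); equivalence is about the return value only.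

-- ===== PORT A =====
-- inner 'for j in range(NEIBER_COUNT)' loop: returns the updated used list on break, none on for-else
def pvInnerA (x? : Option Int) (f2 : List Int) (used : List Bool) : List Int → Option (List Bool)
  | [] => none
  | j :: js =>
      if !(used.getD j.toNat false) && (x? == PySem.List.pyGet? f2 j)
      then some (used.set j.toNat true)
      else pvInnerA x? f2 used js

-- outer 'for i in range(NEIBER_COUNT)' loop over the remaining indices, threading used
def pvOuterA (f1 : List Int) (f2 : List Int) : List Int → List Bool → Bool
  | [], _ => true
  | i :: is, used =>
      match pvInnerA (PySem.List.pyGet? f1 i) f2 used (PySem.List.pyRange 0 4 1) with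
      | none => false
      | some used' => pvOuterA f1 f2 is used'

def feature_is_same (f1 : List Int) (f2 : List Int) : Bool :=
  pvOuterA f1 f2 (PySem.List.pyRange 0 4 1) (List.replicate 4 false)

-- ===== PORT B =====
def feature_is_same_alt (f1 : List Int) (f2 : List Int) : Bool :=
  let a := (PySem.List.pyRange 0 4 1).map (fun i => PySem.List.pyGetD f1 i 0)
  let b := (PySem.List.pyRange 0 4 1).map (fun i => PySem.List.pyGetD f2 i 0)
  PySem.List.sorted a (fun x => x) false == PySem.List.sorted b (fun x => x) false

-- ===== PRECONDITION & SPEC =====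
-- Pre_ restricts to the function's natural domain of (at least) 4-element feature lists.
-- On shorter lists A's behaviour is an artefact of its loop order (IndexError on most,
-- an accidental early False on some), and B raises IndexError on all of them.
def Pre_feature_is_same (f1 : List Int) (f2 : List Int) : Prop :=
  4 ≤ f1.length ∧ 4 ≤ f2.length
instance (f1 : List Int) (f2 : List Int) : Decidable (Pre_feature_is_same f1 f2) := by
  unfold Pre_feature_is_same; infer_instance

def pvWitness_feature_is_same : List Int × List Int := ([1, 2, 3, 4], [4, 3, 2, 1])

def Spec_feature_is_same (f1 : List Int) (f2 : List Int) (out : Bool) : Prop := out = feature_is_same_alt f1 f2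
instance (f1 : List Int) (f2 : List Int) (out : Bool) : Decidable (Spec_feature_is_same f1 f2 out) := by unfold Spec_feature_is_same; infer_instance

-- ===== CLAIM (what is proved, stated in full; the proofs are below) =====
def Claim_equal_feature_is_same : Prop := ∀ (f1 : List Int) (f2 : List Int), Dom_feature_is_same f1 f2 → Pre_feature_is_same f1 f2 → Spec_feature_is_same f1 f2 (feature_is_same f1 f2)

-- ===== LEMMAS AND PROOFS =====

-- abstract, position-free version of the inner loop: scan (value, used) pairs in order
def pvStep (x : Int) : List (Int × Bool) → Option (List (Int × Bool))
  | [] => none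
  | (y, u) :: t =>
      if !u && (x == y) then some ((y, true) :: t)
      else (pvStep x t).map ((y, u) :: ·)

-- the values at the still-unused positions, in order
def pvResid (l : List (Int × Bool)) : List Int :=
  l.filterMap (fun p => if p.2 then none else some p.1)

-- abstract version of the outer loop
def pvOuterP : List Int → List (Int × Bool) → Bool
  | [], _ => true
  | x :: xs, ps =>
      match pvStep x ps with
      | none => false
      | some ps' => pvOuterP xs ps'

-- greedy erase loop on the residual list
def pvEraseLoop : List Int → List Int → Bool
  | [], _ => true
  | x :: xs, b => if x ∈ b then pvEraseLoop xs (b.erase x) else false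

lemma pvStep_none_iff (x : Int) (l : List (Int × Bool)) :
    pvStep x l = none ↔ x ∉ pvResid l := by
  induction l with
  | nil => simp [pvStep, pvResid]
  | cons p t ih =>
      obtain ⟨y, u⟩ := p
      by_cases hu : u <;> by_cases hxy : x = y <;>
        simp [pvStep, pvResid, hu, hxy, Option.map_eq_none_iff] at * <;> tauto

lemma pvStep_some_resid (x : Int) (l l' : List (Int × Bool))
    (h : pvStep x l = some l') : pvResid l' = (pvResid l).erase x := by
  induction l generalizing l' with
  | nil => simp [pvStep] at h
  | cons p t ih =>
      obtain ⟨y, u⟩ := p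
      by_cases hu : u
      · simp [pvStep, hu, Option.map_eq_some_iff] at h
        obtain ⟨t', ht', rfl⟩ := h
        simp [pvResid, hu] at *
        exact ih _ ht'
      · by_cases hxy : x = y
        · simp [pvStep, hu, hxy] at h
          subst h
          simp [pvResid, hu, hxy, List.erase_cons_head]
        · simp [pvStep, hu, hxy, Option.map_eq_some_iff] at h
          obtain ⟨t', ht', rfl⟩ := h
          have := ih _ ht'
          simp [pvResid, hu] at *
          rw [this, List.erase_cons_tail]
          simp
          exact fun hcontra => hxy hcontra.symm
  
lemma pvOuterP_eq_eraseLoop (xs : List Int) (ps : List (Int × Bool)) :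
    pvOuterP xs ps = pvEraseLoop xs (pvResid ps) := by
  induction xs generalizing ps with
  | nil => rfl
  | cons x xs ih =>
      cases h : pvStep x ps with
      | none =>
          have hx : x ∉ pvResid ps := (pvStep_none_iff x ps).mp h
          simp [pvOuterP, pvEraseLoop, h, hx]
      | some ps' =>
          have hx : x ∈ pvResid ps := by
            by_contra hc
            rw [← pvStep_none_iff x ps] at hc
            simp [h] at hc
          simp [pvOuterP, pvEraseLoop, h, hx, ih, pvStep_some_resid x ps ps' h]

lemma pvEraseLoop_iff (xs b : List Int) (h : xs.length = b.length) :
    pvEraseLoop xs b = true ↔ xs.Perm b := by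
  induction xs generalizing b with
  | nil =>
      cases b with
      | nil => simp [pvEraseLoop]
      | cons y t => simp at h
  | cons x xs ih =>
      by_cases hx : x ∈ b
      · have h' : xs.length + 1 = b.length := by simpa using h
        have hlen : xs.length = (b.erase x).length := by
          rw [List.length_erase_of_mem hx]; omega
        rw [pvEraseLoop, if_pos hx, ih _ hlen, List.cons_perm_iff_perm_erase]
        tauto
      · rw [pvEraseLoop, if_neg hx]
        constructor
        · intro hc; exact absurd hc (by simp)
        · intro hp; exact absurd (hp.mem_iff.mp (by simp)) hx

-- the inner loop over indices [0,1,2,3], on a length-≥4 list and a length-4 used list,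
-- is the structural pvStep (the result read back as its used-flags)
set_option maxHeartbeats 1000000 in
lemma pvInner_eq (x y0 y1 y2 y3 : Int) (r : List Int) (u0 u1 u2 u3 : Bool) :
    pvInnerA (some x) (y0 :: y1 :: y2 :: y3 :: r) [u0, u1, u2, u3] (PySem.List.pyRange 0 4 1)
      = (pvStep x [(y0, u0), (y1, u1), (y2, u2), (y3, u3)]).map (·.map (·.2)) := by
  have hr : PySem.List.pyRange 0 4 1 = [0, 1, 2, 3] := by decide
  have h0 : PySem.List.pyGet? (y0 :: y1 :: y2 :: y3 :: r) 0 = some y0 := by simp [pysem]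
  have h1 : PySem.List.pyGet? (y0 :: y1 :: y2 :: y3 :: r) 1 = some y1 := by simp [pysem]
  have h2 : PySem.List.pyGet? (y0 :: y1 :: y2 :: y3 :: r) 2 = some y2 := by simp [pysem]
  have h3 : PySem.List.pyGet? (y0 :: y1 :: y2 :: y3 :: r) 3 = some y3 := by simp [pysem]
  rw [hr]
  simp only [pvInnerA, pvStep, h0, h1, h2, h3]
  split_ifs <;> simp_all

lemma pvStep4_shape (x y0 y1 y2 y3 : Int) (u0 u1 u2 u3 : Bool) :
    pvStep x [(y0, u0), (y1, u1), (y2, u2), (y3, u3)] = none ∨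
      ∃ v0 v1 v2 v3, pvStep x [(y0, u0), (y1, u1), (y2, u2), (y3, u3)]
        = some [(y0, v0), (y1, v1), (y2, v2), (y3, v3)] := by
  simp only [pvStep]
  split_ifs <;> simp

lemma pvOuter_eq (f2 : List Int) (y0 y1 y2 y3 : Int) (r2 : List Int)
    (hf2 : f2 = y0 :: y1 :: y2 :: y3 :: r2)
    (f1 : List Int) (is : List Int)
    (hin : ∀ i ∈ is, ∃ v, PySem.List.pyGet? f1 i = some v)
    (u0 u1 u2 u3 : Bool) :
    pvOuterA f1 f2 is [u0, u1, u2, u3]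
      = pvOuterP (is.map (fun i => (PySem.List.pyGet? f1 i).getD 0))
          [(y0, u0), (y1, u1), (y2, u2), (y3, u3)] := by
  induction is generalizing u0 u1 u2 u3 with
  | nil => rfl
  | cons i is ih =>
      obtain ⟨v, hv⟩ := hin i (by simp)
      have hin' : ∀ i ∈ is, ∃ v, PySem.List.pyGet? f1 i = some v :=
        fun j hj => hin j (by simp [hj])
      rw [pvOuterA, hf2, hv, pvInner_eq]
      rcases pvStep4_shape v y0 y1 y2 y3 u0 u1 u2 u3 with hs | ⟨v0, v1, v2, v3, hs⟩ <;>
        simp [hv, hs, pvOuterP, List.map_cons, ih hin', ← hf2]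

-- evaluate B's prefix extraction on a destructured list
lemma pvPrefix_eq (x0 x1 x2 x3 : Int) (r : List Int) :
    (PySem.List.pyRange 0 4 1).map
        (fun i => PySem.List.pyGetD (x0 :: x1 :: x2 :: x3 :: r) i 0)
      = [x0, x1, x2, x3] := by
  have hr : PySem.List.pyRange 0 4 1 = [0, 1, 2, 3] := by decide
  rw [hr]
  simp only [List.map_cons, List.map_nil]
  simp [pysem]

-- ===== VERDICT (by name: the statement is the Claim_ definition above) =====
theorem feature_is_same_spec : Claim_equal_feature_is_same := by
  intro f1 f2 _ hpre
  obtain ⟨h1, h2⟩ := hpre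
  match f1, f2 with
  | x0 :: x1 :: x2 :: x3 :: r1, y0 :: y1 :: y2 :: y3 :: r2 =>
    unfold Spec_feature_is_same feature_is_same feature_is_same_alt
    have hin : ∀ i ∈ PySem.List.pyRange 0 4 1,
        ∃ v, PySem.List.pyGet? (x0 :: x1 :: x2 :: x3 :: r1) i = some v := by
      intro i hi
      rw [PySem.List.mem_pyRange_one] at hi
      obtain ⟨hl, hu⟩ := hi
      interval_cases i <;> simp [pysem]
    have hrepl : (List.replicate 4 false : List Bool) = [false, false, false, false] := rfl
    rw [hrepl, pvOuter_eq _ y0 y1 y2 y3 r2 rfl _ _ hin,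
      pvOuterP_eq_eraseLoop, pvPrefix_eq, pvPrefix_eq]
    have hresid : pvResid [(y0, false), (y1, false), (y2, false), (y3, false)]
        = [y0, y1, y2, y3] := rfl
    have hmap : (PySem.List.pyRange 0 4 1).map
        (fun i => (PySem.List.pyGet? (x0 :: x1 :: x2 :: x3 :: r1) i).getD 0)
        = [x0, x1, x2, x3] := by
      have hr : PySem.List.pyRange 0 4 1 = [0, 1, 2, 3] := by decide
      rw [hr]
      simp only [List.map_cons, List.map_nil]
      simp [pysem]
    rw [hmap, hresid, Bool.eq_iff_iff,
      pvEraseLoop_iff _ _ (by simp), beq_iff_eq,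
      PySem.List.sorted_id_eq_sorted_id_iff_perm]
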